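-- pv_equiv track=rewrite | github.com/Marvelous-Software/Gateway | Python/Assessment6.py | calculate_path_to_goal
-- ===== SOURCE A (Python) =====
-- def calculate_path_to_goal(sorted_object_list):
--     path = []
--     for x in sorted_object_list :
--         if x[2][0] in 'FT' :
--             path.append(x)
--         elif x[2][0] in 'G' :
--             path.append(x)
--             break
--     return path
-- ===== SOURCE B (Python) =====
-- def calculate_path_to_goal(sorted_object_list):
--     # locate-then-filter: find the first goal marker, bound the list, then filter in a second pass
--     idx = next((i for i, x in enumerate(sorted_object_list) if x[2].startswith('G')), None)
--     prefix = sorted_object_list if idx is None else sorted_object_list[:idx + 1]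
--     return [x for x in prefix if x[2].startswith(('F', 'T', 'G'))]
-- ===== Notes on version B (the rewrite author's own statement) =====
-- stated objective: alternative
-- what changed: Replaces the single accumulate-with-early-break loop by a locate-then-filter decomposition: first find the index of the first goal marker, cut the list there, then filter the prefix for F/T/G markers in a second pass.
import Mathlib
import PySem

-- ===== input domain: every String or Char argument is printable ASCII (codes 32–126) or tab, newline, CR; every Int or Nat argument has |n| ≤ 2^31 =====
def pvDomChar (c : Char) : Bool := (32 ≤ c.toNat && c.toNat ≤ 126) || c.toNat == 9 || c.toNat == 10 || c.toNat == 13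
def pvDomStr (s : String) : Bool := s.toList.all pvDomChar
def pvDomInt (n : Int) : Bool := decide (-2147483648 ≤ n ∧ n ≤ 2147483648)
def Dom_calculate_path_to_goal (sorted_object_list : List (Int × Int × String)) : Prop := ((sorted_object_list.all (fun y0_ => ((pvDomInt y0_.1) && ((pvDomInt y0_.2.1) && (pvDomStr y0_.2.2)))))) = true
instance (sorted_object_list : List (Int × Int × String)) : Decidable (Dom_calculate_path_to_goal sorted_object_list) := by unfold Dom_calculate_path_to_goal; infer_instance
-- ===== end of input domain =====

-- B replaces A's accumulate-with-early-break loop by a locate-then-filter decomposition (same cost, different structure).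


-- ===== PORT A =====
-- Loop with early break; 'x[2][0]' is PySem.Str.pyGet? (none = IndexError, excluded by Pre_);
-- 'c in "FT"' / 'c in "G"' on the single character c is exact as equality tests.
def calculate_path_to_goal (sorted_object_list : List (Int × Int × String)) : List (Int × Int × String) :=
  match sorted_object_list with
  | [] => []
  | x :: rest =>
    match PySem.Str.pyGet? x.2.2 0 with
    | none => []  -- Python raises IndexError here; such inputs are outside Pre_
    | some c =>
      if c == 'F' || c == 'T' then x :: calculate_path_to_goal rest
      else if c == 'G' then [x]
      else calculate_path_to_goal rest

-- ===== PORT B =====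
def calculate_path_to_goal_alt (sorted_object_list : List (Int × Int × String)) : List (Int × Int × String) :=
  let idx? := sorted_object_list.findIdx? (fun x => PySem.Str.startswith x.2.2 "G")
  let pre :=
    match idx? with
    | none => sorted_object_list
    | some i => PySem.List.slice sorted_object_list none (some ((i : Int) + 1))
  pre.filter (fun x =>
    PySem.Str.startswith x.2.2 "F" || PySem.Str.startswith x.2.2 "T" || PySem.Str.startswith x.2.2 "G")

-- ===== PRECONDITION & SPEC =====
-- A's scan stops only at an element whose type string is empty (IndexError) or starts with 'G' (break);
-- Pre_ admits exactly the inputs whose first such "stopper", if any, is nonempty — i.e. exactly where A returns normally.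
def pvStop (x : Int × Int × String) : Bool :=
  x.2.2.toList.isEmpty || (x.2.2.toList.head? == some 'G')

def Pre_calculate_path_to_goal (sorted_object_list : List (Int × Int × String)) : Prop :=
  (Option.all (fun r => !r.2.2.toList.isEmpty) (sorted_object_list.find? pvStop)) = true
instance (sorted_object_list : List (Int × Int × String)) : Decidable (Pre_calculate_path_to_goal sorted_object_list) := by unfold Pre_calculate_path_to_goal; infer_instance

def pvWitness_calculate_path_to_goal : (List (Int × Int × String)) :=
  [(0, 0, "F"), (1, 2, "Goal"), (3, 4, "X")]

def Spec_calculate_path_to_goal (sorted_object_list : List (Int × Int × String)) (out : List (Int × Int × String)) : Prop := out = calculate_path_to_goal_alt sorted_object_list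
instance (sorted_object_list : List (Int × Int × String)) (out : List (Int × Int × String)) : Decidable (Spec_calculate_path_to_goal sorted_object_list out) := by unfold Spec_calculate_path_to_goal; infer_instance

-- ===== CLAIM (what is proved, stated in full; the proofs are below) =====
def Claim_equal_calculate_path_to_goal : Prop := ∀ (sorted_object_list : List (Int × Int × String)), Dom_calculate_path_to_goal sorted_object_list → Pre_calculate_path_to_goal sorted_object_list → Spec_calculate_path_to_goal sorted_object_list (calculate_path_to_goal sorted_object_list)

-- ===== LEMMAS AND PROOFS =====

-- one-character prefix test against a nonempty string is an equality test on its head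
theorem pv_sw (s t : String) (c g : Char) (cs : List Char)
    (h : s.toList = c :: cs) (ht : t.toList = [g]) :
    PySem.Str.startswith s t = (c == g) := by
  rw [PySem.Str.startswith_eq, h, ht]
  by_cases hc : c = g
  · subst hc
    simp only [beq_self_eq_true]
    exact (PySem.Chars.startswith_iff _ _).mpr ⟨cs, rfl⟩
  · rw [show (c == g) = false from beq_eq_false_iff_ne.mpr hc, Bool.eq_false_iff]
    intro hp
    obtain ⟨t2, ht2⟩ := (PySem.Chars.startswith_iff _ _).mp hp
    exact hc (by injection ht2 with h1 _; exact h1.symm)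

-- B on a cons cell whose head string starts with the character c
theorem pv_alt_cons (x : Int × Int × String) (rest : List (Int × Int × String))
    (c : Char) (cs : List Char) (h : x.2.2.toList = c :: cs) :
    calculate_path_to_goal_alt (x :: rest) =
      if c = 'G' then [x]
      else if c = 'F' ∨ c = 'T' then x :: calculate_path_to_goal_alt rest
      else calculate_path_to_goal_alt rest := by
  have hG := pv_sw x.2.2 "G" c 'G' cs h rfl
  have hF := pv_sw x.2.2 "F" c 'F' cs h rfl
  have hT := pv_sw x.2.2 "T" c 'T' cs h rfl
  unfold calculate_path_to_goal_alt
  rw [List.findIdx?_cons]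
  by_cases hg : c = 'G'
  · rw [if_pos (by rw [hG, hg]; rfl), if_pos hg]
    dsimp only
    rw [PySem.List.slice_to (x :: rest) (b := ((0 : Nat) : Int) + 1) (by omega)]
    have ht : (((0 : Nat) : Int) + 1).toNat = 1 := by omega
    rw [ht, List.take_succ_cons, List.take_zero, List.filter_cons,
        if_pos (by rw [hF, hT, hG, hg]; rfl), List.filter_nil]
  · rw [if_neg (by rw [hG]; simp [hg]), if_neg hg]
    cases hfi : rest.findIdx? (fun x => PySem.Str.startswith x.2.2 "G") with
    | none =>
      dsimp only [Option.map]
      rw [List.filter_cons]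
      by_cases hft : c = 'F' ∨ c = 'T'
      · rw [if_pos (by rw [hF, hT, hG]; rcases hft with h1 | h1 <;> simp [h1]), if_pos hft]
      · push Not at hft
        rw [if_neg (by rw [hF, hT, hG]; simp [hft.1, hft.2, hg]), if_neg (by tauto)]
    | some i =>
      dsimp only [Option.map]
      rw [PySem.List.slice_to (x :: rest) (b := ((i + 1 : Nat) : Int) + 1) (by omega),
          PySem.List.slice_to rest (b := ((i : Nat) : Int) + 1) (by omega)]
      have h1 : (((i + 1 : Nat) : Int) + 1).toNat = (i + 1) + 1 := by omega
      have h2 : (((i : Nat) : Int) + 1).toNat = i + 1 := by omega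
      rw [h1, h2, List.take_succ_cons, List.filter_cons]
      by_cases hft : c = 'F' ∨ c = 'T'
      · rw [if_pos (by rw [hF, hT, hG]; rcases hft with h1 | h1 <;> simp [h1]), if_pos hft]
      · push Not at hft
        rw [if_neg (by rw [hF, hT, hG]; simp [hft.1, hft.2, hg]), if_neg (by tauto)]

theorem pv_main (l : List (Int × Int × String))
    (hpre : Pre_calculate_path_to_goal l) :
    calculate_path_to_goal l = calculate_path_to_goal_alt l := by
  induction l with
  | nil => simp [calculate_path_to_goal, calculate_path_to_goal_alt]
  | cons x rest ih =>
    unfold Pre_calculate_path_to_goal at hpre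
    rw [List.find?_cons] at hpre
    cases hx : x.2.2.toList with
    | nil =>
      have hstop : pvStop x = true := by simp [pvStop, hx]
      rw [hstop] at hpre
      simp [hx] at hpre
    | cons c cs =>
      have hget : PySem.Str.pyGet? x.2.2 0 = some c := by
        simp [hx]
      rw [pv_alt_cons x rest c cs hx]
      unfold calculate_path_to_goal
      rw [hget]
      dsimp only
      by_cases hg : c = 'G'
      · rw [if_neg (by rw [hg]; simp), if_pos (by rw [hg]; rfl), if_pos hg]
      · have hstop : pvStop x = false := by simp [pvStop, hx, hg]
        rw [hstop] at hpre
        dsimp only at hpre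
        have ihr := ih hpre
        by_cases hft : c = 'F' ∨ c = 'T'
        · rw [if_pos (by rcases hft with h1 | h1 <;> simp [h1]), if_neg hg, if_pos hft, ihr]
        · push Not at hft
          rw [if_neg (by simp [hft.1, hft.2]), if_neg (by simp [hg]), if_neg hg, if_neg (by tauto), ihr]

-- ===== VERDICT (by name: the statement is the Claim_ definition above) =====
theorem calculate_path_to_goal_spec : Claim_equal_calculate_path_to_goal := by
  intro l _ hpre
  unfold Spec_calculate_path_to_goal
  exact pv_main l hpre
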